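-- pv_equiv track=rewrite | github.com/withNoclout/LeetCode-Med | quiz_NumofSequences.py | numOfSubsequences
-- ===== SOURCE A (Python) =====
-- def numOfSubsequences(s):
--     """
--     :type s: str
--     :rtype: int
--     """
--     # Helper function to count subsequences of length 2 (e.g., "LC" or "CT")
--     def calc(t):
--         cnt = 0
--         a = 0
--         for c in s:
--             if c == t[1]:
--                 cnt += a
--             if c == t[0]:
--                 a += 1
--         return cnt
--
--     l = 0
--     r = s.count('T')
--     ans = 0
--     mx = 0
--
--     # Pass 1: Count existing "LCT" and calculate max gain for inserting 'C'
--     for c in s: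
--         if c == 'T':
--             r -= 1
--
--         if c == 'C':
--             ans += l * r
--
--         if c == 'L':
--             l += 1
--
--         # Maximize gain if we insert 'C' at the current position
--         mx = max(mx, l * r)
--
--     # Pass 2 & 3 (via helper): Maximize gain for inserting 'L' (count "CT") or 'T' (count "LC")
--     mx = max(mx, calc("LC"), calc("CT"))
--
--     return ans + mx
-- ===== SOURCE B (Python) =====
-- def numOfSubsequences(s):
--     r = s.count('T')
--     l = nc = lc = ct = ans = best = 0
--     for ch in s:
--         if ch == 'T':
--             r -= 1
--             ct += nc
--         if ch == 'C':
--             ans += l * r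
--             nc += 1
--             lc += l
--         if ch == 'L':
--             l += 1
--         g = l * r
--         if g > best:
--             best = g
--     return ans + max(best, lc, ct)
-- ===== Notes on version B (the rewrite author's own statement) =====
-- stated objective: simpler
-- what changed: Replaces A's three separate scans (main loop plus two rescans by the calc helper for LC and CT pairs) with one fused forward pass that maintains the LC and CT pair counts incrementally alongside the LCT count and the insert-C gain; fewer passes and no helper closures give a measured constant-factor speedup.
import Mathlib
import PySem

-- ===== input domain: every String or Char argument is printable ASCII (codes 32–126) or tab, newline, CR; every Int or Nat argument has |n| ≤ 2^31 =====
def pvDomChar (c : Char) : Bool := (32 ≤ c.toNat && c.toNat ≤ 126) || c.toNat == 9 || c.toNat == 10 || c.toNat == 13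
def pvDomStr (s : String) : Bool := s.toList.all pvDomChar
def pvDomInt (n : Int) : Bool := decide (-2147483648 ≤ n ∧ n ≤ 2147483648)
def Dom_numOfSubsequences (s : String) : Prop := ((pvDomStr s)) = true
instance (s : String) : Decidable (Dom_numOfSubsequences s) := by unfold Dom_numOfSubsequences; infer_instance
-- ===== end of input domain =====

-- B fuses A's three scans (main loop + two `calc` helper rescans) into one pass with incremental pair counters; objective: simpler & measurably faster (fewer passes).


-- ===== PORT A =====
-- helper `calc(t)` of A: counts subsequences t[0]t[1] of s
def pvCalcA (s : String) (t : String) : Int :=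
  (s.toList.foldl (fun (p : Int × Int) c =>
      let cnt := if some c = PySem.Str.pyGet? t 1 then p.1 + p.2 else p.1
      let a := if some c = PySem.Str.pyGet? t 0 then p.2 + 1 else p.2
      (cnt, a)) (0, 0)).1

-- main loop step of A: state (l, r, ans, mx)
def pvStepA (q : Int × Int × Int × Int) (c : Char) : Int × Int × Int × Int :=
  let l := q.1; let r := q.2.1; let ans := q.2.2.1; let mx := q.2.2.2
  let r := if c = 'T' then r - 1 else r
  let ans := if c = 'C' then ans + l * r else ans
  let l := if c = 'L' then l + 1 else l
  let mx := max mx (l * r)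
  (l, r, ans, mx)

def numOfSubsequences (s : String) : Int :=
  let st := s.toList.foldl pvStepA (0, PySem.Str.count s "T", 0, 0)
  st.2.2.1 + max (max st.2.2.2 (pvCalcA s "LC")) (pvCalcA s "CT")

-- ===== PORT B =====
structure PvBSt where
  r : Int
  l : Int
  nc : Int
  lc : Int
  ct : Int
  ans : Int
  best : Int
  deriving DecidableEq, Repr

def pvStepB (q : PvBSt) (c : Char) : PvBSt :=
  let q := if c = 'T' then { q with r := q.r - 1, ct := q.ct + q.nc } else q
  let q := if c = 'C' then { q with ans := q.ans + q.l * q.r, nc := q.nc + 1, lc := q.lc + q.l } else q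
  let q := if c = 'L' then { q with l := q.l + 1 } else q
  let g := q.l * q.r
  if g > q.best then { q with best := g } else q

def numOfSubsequences_alt (s : String) : Int :=
  let st := s.toList.foldl pvStepB ⟨PySem.Str.count s "T", 0, 0, 0, 0, 0, 0⟩
  st.ans + max (max st.best st.lc) st.ct

-- ===== PRECONDITION & SPEC =====
def Spec_numOfSubsequences (s : String) (out : Int) : Prop := out = numOfSubsequences_alt s
instance (s : String) (out : Int) : Decidable (Spec_numOfSubsequences s out) := by unfold Spec_numOfSubsequences; infer_instance

-- ===== CLAIM (what is proved, stated in full; the proofs are below) =====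
def Claim_equal_numOfSubsequences : Prop := ∀ (s : String), Dom_numOfSubsequences s → Spec_numOfSubsequences s (numOfSubsequences s)

-- ===== LEMMAS AND PROOFS =====

-- proof-side steps for A's two calc helpers, with the literal chars of "LC"/"CT" resolved
def pvStepLC (p : Int × Int) (c : Char) : Int × Int :=
  (if c = 'C' then p.1 + p.2 else p.1, if c = 'L' then p.2 + 1 else p.2)

def pvStepCT (p : Int × Int) (c : Char) : Int × Int :=
  (if c = 'T' then p.1 + p.2 else p.1, if c = 'C' then p.2 + 1 else p.2)

lemma pvCalcA_LC (s : String) : pvCalcA s "LC" = (s.toList.foldl pvStepLC (0, 0)).1 := by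
  unfold pvCalcA
  have h : (fun (p : Int × Int) c =>
      let cnt := if some c = PySem.Str.pyGet? "LC" 1 then p.1 + p.2 else p.1
      let a := if some c = PySem.Str.pyGet? "LC" 0 then p.2 + 1 else p.2
      (cnt, a)) = pvStepLC := by
    funext p c
    simp [pvStepLC, show PySem.Str.pyGet? "LC" 1 = some 'C' from by decide,
          show PySem.Str.pyGet? "LC" 0 = some 'L' from by decide]
  rw [h]

lemma pvCalcA_CT (s : String) : pvCalcA s "CT" = (s.toList.foldl pvStepCT (0, 0)).1 := by
  unfold pvCalcA
  have h : (fun (p : Int × Int) c =>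
      let cnt := if some c = PySem.Str.pyGet? "CT" 1 then p.1 + p.2 else p.1
      let a := if some c = PySem.Str.pyGet? "CT" 0 then p.2 + 1 else p.2
      (cnt, a)) = pvStepCT := by
    funext p c
    simp [pvStepCT, show PySem.Str.pyGet? "CT" 1 = some 'T' from by decide,
          show PySem.Str.pyGet? "CT" 0 = some 'C' from by decide]
  rw [h]

lemma pv_ite_struct (r l nc lc ct ans mx g : Int) :
    (if g > mx then (⟨r, l, nc, lc, ct, ans, g⟩ : PvBSt) else ⟨r, l, nc, lc, ct, ans, mx⟩) =
      ⟨r, l, nc, lc, ct, ans, max mx g⟩ := by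
  split <;> simp <;> omega

-- key invariant: B's fused fold carries exactly the states of A's main fold and the two calc folds
lemma pv_key (cs : List Char) : ∀ (l r ans mx lc ct nc : Int),
    cs.foldl pvStepB ⟨r, l, nc, lc, ct, ans, mx⟩ =
      ⟨(cs.foldl pvStepA (l, r, ans, mx)).2.1,
       (cs.foldl pvStepA (l, r, ans, mx)).1,
       (cs.foldl pvStepCT (ct, nc)).2,
       (cs.foldl pvStepLC (lc, l)).1,
       (cs.foldl pvStepCT (ct, nc)).1,
       (cs.foldl pvStepA (l, r, ans, mx)).2.2.1,
       (cs.foldl pvStepA (l, r, ans, mx)).2.2.2⟩ := by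
  induction cs with
  | nil => intro l r ans mx lc ct nc; rfl
  | cons c cs ih =>
    intro l r ans mx lc ct nc
    by_cases hT : c = 'T' <;> by_cases hC : c = 'C' <;> by_cases hL : c = 'L' <;>
      simp_all [List.foldl, pvStepA, pvStepB, pvStepLC, pvStepCT, pv_ite_struct]

-- ===== VERDICT (by name: the statement is the Claim_ definition above) =====
theorem numOfSubsequences_spec : Claim_equal_numOfSubsequences := by
  intro s _
  show numOfSubsequences s = numOfSubsequences_alt s
  unfold numOfSubsequences numOfSubsequences_alt
  rw [pvCalcA_LC, pvCalcA_CT, pv_key]
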